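-- pv_equiv track=rewrite | github.com/fitzscott/TMSelGame | genTMgameopts.py | legit_game
-- ===== SOURCE A (Python) =====
-- def legit_game(game_combo):
--     # for a combination of 2-corporation sets to make a potential game,
--     # eliminate any that have the same corporation listed more than once.
--     corp_cnts = {}
--     retval = True
--     for corp_combos in game_combo:
--         for cidx in range(2):
--             corp_cnts[corp_combos[cidx]] = corp_cnts.get(corp_combos[cidx], 0) + 1
--     for cnt in corp_cnts.values():
--         if cnt > 1:
--             retval = False
--             break
--     return retval
-- ===== SOURCE B (Python) =====
-- def legit_game(game_combo):
--     # Sort all corporations; any repeated corporation must then appear as two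
--     # equal neighbours, so one adjacent-pair scan of the sorted list decides it.
--     flat = []
--     for pair in game_combo:
--         for i in range(2):
--             flat.append(pair[i])
--     flat.sort()
--     for j in range(len(flat) - 1):
--         if flat[j] == flat[j + 1]:
--             return False
--     return True
-- ===== Notes on version B (the rewrite author's own statement) =====
-- stated objective: alternative
-- what changed: Replaces A's frequency-dict build plus a scan over its counts with sort-then-adjacent-neighbour-scan: sort all corporations and return False iff two equal elements end up adjacent.
import Mathlib
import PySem

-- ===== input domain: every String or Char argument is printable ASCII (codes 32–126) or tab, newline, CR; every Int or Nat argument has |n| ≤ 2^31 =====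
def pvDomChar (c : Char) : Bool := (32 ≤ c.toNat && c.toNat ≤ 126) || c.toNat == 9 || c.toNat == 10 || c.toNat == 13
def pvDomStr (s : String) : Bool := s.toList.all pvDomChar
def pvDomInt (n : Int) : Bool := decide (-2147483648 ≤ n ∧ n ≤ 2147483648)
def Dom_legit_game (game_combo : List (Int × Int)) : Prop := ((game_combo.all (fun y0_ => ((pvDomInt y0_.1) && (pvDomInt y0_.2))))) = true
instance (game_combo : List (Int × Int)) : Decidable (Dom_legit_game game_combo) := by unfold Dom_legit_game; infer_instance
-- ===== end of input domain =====

-- B replaces A's frequency-dict build plus value scan with sort-then-adjacent-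
-- neighbour-scan (alternative algorithm; same return value everywhere).


-- ===== PORT A =====
-- corp_combos[cidx] on a 2-tuple, for cidx drawn from range(2)
def pvPairGet (p : Int × Int) (i : Int) : Int := if i = 0 then p.1 else p.2

-- the trailing 'for cnt in corp_cnts.values(): if cnt > 1: retval=False; break'
def pvScanVals : List Int → Bool
  | [] => true
  | c :: rest => if c > 1 then false else pvScanVals rest

def legit_game (game_combo : List (Int × Int)) : Bool :=
  let corp_cnts : PySem.Dict Int Int :=
    game_combo.foldl (fun d corp_combos =>
      (PySem.List.pyRange 0 2 1).foldl (fun d cidx =>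
        d.insert (pvPairGet corp_combos cidx)
          (d.getD (pvPairGet corp_combos cidx) 0 + 1)) d)
      PySem.Dict.empty
  pvScanVals corp_cnts.values

-- ===== PORT B =====
-- the 'for j in range(len(flat)-1): if flat[j] == flat[j+1]: return False' scan,
-- as the obvious structural recursion over adjacent neighbours
def pvAdjScan : List Int → Bool
  | a :: b :: rest => if a == b then false else pvAdjScan (b :: rest)
  | _ => true

def legit_game_alt (game_combo : List (Int × Int)) : Bool :=
  let flat :=
    game_combo.foldl (fun acc pair =>
      (PySem.List.pyRange 0 2 1).foldl (fun acc i => acc ++ [pvPairGet pair i]) acc) []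
  pvAdjScan (PySem.List.sorted flat (fun x => x) false)

-- ===== PRECONDITION & SPEC =====
def Spec_legit_game (game_combo : List (Int × Int)) (out : Bool) : Prop := out = legit_game_alt game_combo
instance (game_combo : List (Int × Int)) (out : Bool) : Decidable (Spec_legit_game game_combo out) := by unfold Spec_legit_game; infer_instance

-- ===== CLAIM (what is proved, stated in full; the proofs are below) =====
def Claim_equal_legit_game : Prop := ∀ (game_combo : List (Int × Int)), Dom_legit_game game_combo → Spec_legit_game game_combo (legit_game game_combo)

-- ===== LEMMAS AND PROOFS =====

theorem pvScanVals_eq_not_any (l : List Int) :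
    pvScanVals l = !(l.any (fun c => decide (1 < c))) := by
  induction l with
  | nil => rfl
  | cons c rest ih =>
      simp only [pvScanVals, List.any_cons]
      by_cases h : c > 1 <;> simp [h, ih]

-- the double loop of A builds exactly Counter(flat list)
theorem pvDict_eq_counter (g : List (Int × Int)) (d : PySem.Dict Int Int) :
    g.foldl (fun d corp_combos =>
      (PySem.List.pyRange 0 2 1).foldl (fun d cidx =>
        d.insert (pvPairGet corp_combos cidx)
          (d.getD (pvPairGet corp_combos cidx) 0 + 1)) d) d
    = (g.flatMap (fun pair => [pair.1, pair.2])).foldl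
        (fun d x => d.insert x (d.getD x 0 + 1)) d := by
  induction g generalizing d with
  | nil => rfl
  | cons p g ih =>
      rw [List.foldl_cons, List.flatMap_cons, List.foldl_append, ih]
      have hr : PySem.List.pyRange 0 2 1 = [0, 1] := by decide
      rw [hr]
      simp only [List.foldl_cons, List.foldl_nil, pvPairGet]
      norm_num

theorem pvA_eq_nodup (g : List (Int × Int)) :
    legit_game g = decide (g.flatMap (fun pair => [pair.1, pair.2])).Nodup := by
  unfold legit_game
  rw [pvDict_eq_counter, PySem.Dict.foldl_insert_getD_add_one_eq_counter]
  set all := g.flatMap (fun pair => [pair.1, pair.2]) with hall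
  rw [pvScanVals_eq_not_any]
  have hvals : (PySem.Dict.counter all).values
      = (PySem.Set.ofList all).map (fun k => ((all.count k : Int))) := by
    simp only [PySem.Dict.values, PySem.Dict.items_counter, List.map_map]
    rfl
  rw [hvals, List.any_map]
  by_cases h : all.Nodup
  · have : ∀ k ∈ PySem.Set.ofList all, ¬ (1 : Int) < (all.count k : Int) := by
      intro k _
      have := List.nodup_iff_count_le_one.mp h k
      exact_mod_cast by omega
    simp only [h, decide_true, Bool.not_eq_true', List.any_eq_false]
    intro k hk
    simpa using this k hk
  · have : ∃ k, 1 < all.count k := by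
      by_contra hc
      push Not at hc
      exact h (List.nodup_iff_count_le_one.mpr (fun a => by have := hc a; omega))
    obtain ⟨k, hk⟩ := this
    have hkmem : k ∈ all := List.count_pos_iff.mp (by omega)
    simp only [h, decide_false, Bool.not_eq_false', List.any_eq_true]
    exact ⟨k, (PySem.Set.mem_ofList all k).mpr hkmem, by simp only [Function.comp]; exact decide_eq_true (by exact_mod_cast hk)⟩

-- B's append loop builds the same flat list
theorem pvFlat_eq_flatMap (g : List (Int × Int)) (acc : List Int) :
    g.foldl (fun acc pair =>
      (PySem.List.pyRange 0 2 1).foldl (fun acc i => acc ++ [pvPairGet pair i]) acc) acc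
    = acc ++ g.flatMap (fun pair => [pair.1, pair.2]) := by
  induction g generalizing acc with
  | nil => simp
  | cons p g ih =>
      rw [List.foldl_cons, List.flatMap_cons, ih]
      have hr : PySem.List.pyRange 0 2 1 = [0, 1] := by decide
      rw [hr]
      simp [pvPairGet]

-- on a ≤-sorted list, the adjacent scan decides Nodup
theorem pvAdjScan_sorted (l : List Int) (hs : l.Pairwise (· ≤ ·)) :
    pvAdjScan l = decide l.Nodup := by
  induction l with
  | nil => rfl
  | cons a t ih =>
      match t, hs with
      | [], _ => rfl
      | b :: t', hs =>
        have hab : a ≤ b := (List.pairwise_cons.mp hs).1 b (by simp)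
        have hrest := (List.pairwise_cons.mp hs).2
        by_cases hEq : a = b
        · subst hEq
          simp [pvAdjScan]
        · have hne : (a == b) = false := by simp [hEq]
          simp only [pvAdjScan, hne, ih hrest]
          have halt : a ∉ b :: t' := by
            intro hmem
            rcases List.mem_cons.mp hmem with h | h
            · exact hEq h
            · have hb : ∀ y ∈ t', b ≤ y := fun y hy => (List.pairwise_cons.mp hrest).1 y hy
              have := hb a h
              exact hEq (le_antisymm hab this)
          by_cases hnd : (b :: t').Nodup
          · simp [List.nodup_cons, halt, hnd]
          · simp [List.nodup_cons, hnd]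

theorem pvAlt_eq_nodup (g : List (Int × Int)) :
    legit_game_alt g = decide (g.flatMap (fun pair => [pair.1, pair.2])).Nodup := by
  unfold legit_game_alt
  rw [pvFlat_eq_flatMap]
  set all := g.flatMap (fun pair => [pair.1, pair.2]) with hall
  set s := PySem.List.sorted all (fun x => x) false with hsdef
  have hperm : s.Perm all := PySem.List.sorted_perm all (fun x => x) false
  have hpw : s.Pairwise (· ≤ ·) := by
    have := PySem.List.sorted_pairwise (xs := all) (key := fun x => x)
    simpa using this
  simp only [List.nil_append]
  rw [pvAdjScan_sorted s hpw]
  congr 1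
  exact propext ⟨fun h => hperm.nodup h, fun h => (hperm.symm.nodup h)⟩

-- ===== VERDICT (by name: the statement is the Claim_ definition above) =====
theorem legit_game_spec : Claim_equal_legit_game := by
  intro g _
  unfold Spec_legit_game
  rw [pvA_eq_nodup, pvAlt_eq_nodup]
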